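-- pv_equiv track=rewrite | github.com/boullo2002/TP-multiagentes | src/tools/sql_safety.py | _after_leading_comments
-- ===== SOURCE A (Python) =====
-- def _after_leading_comments(sql: str) -> str:
--     """Quita comentarios `--` y `/* */` al inicio para detectar SELECT/WITH."""
--     s = sql.strip()
--     while s:
--         if s.startswith("--"):
--             nl = s.find("\n")
--             s = "" if nl == -1 else s[nl + 1 :].lstrip()
--         elif s.startswith("/*"):
--             end = s.find("*/")
--             if end == -1:
--                 break
--             s = s[end + 2 :].lstrip()
--         else:
--             break
--     return s.lstrip("(").strip()
-- ===== SOURCE B (Python) =====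
-- # Single-pass character state machine: one scan computes the cut position after the
-- # leading whitespace/comment prefix, then one slice produces the result.
-- CODE, DASH, SLASH, LINE, BLOCK, BLOCKSTAR = range(6)
--
--
-- def _after_leading_comments(sql: str) -> str:
--     state = CODE
--     cut = 0  # position right after the last fully consumed whitespace/comment unit
--     for i, c in enumerate(sql):
--         if state == CODE:
--             if c.isspace():
--                 cut = i + 1
--             elif c == '-':
--                 state = DASH
--             elif c == '/':
--                 state = SLASH
--             else:
--                 break
--         elif state == DASH:  # seen '-', need a second '-'
--             if c == '-':
--                 state = LINE
--             else:
--                 break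
--         elif state == SLASH:  # seen '/', need '*'
--             if c == '*':
--                 state = BLOCKSTAR  # in a block comment; last char read was '*'
--             else:
--                 break
--         elif state == LINE:  # inside a '--' comment
--             if c == '\n':
--                 state = CODE
--                 cut = i + 1
--         elif state == BLOCKSTAR:  # in a block comment, last char read was '*'
--             if c == '/':
--                 state = CODE
--                 cut = i + 1
--             elif c != '*':
--                 state = BLOCK
--         else:  # BLOCK: inside a block comment, last char was not '*'
--             if c == '*':
--                 state = BLOCKSTAR
--     else:
--         if state == LINE:  # '--' comment running to end of string
--             cut = len(sql)
--     return sql[cut:].lstrip('(').strip()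
-- ===== Notes on version B (the rewrite author's own statement) =====
-- stated objective: alternative
-- what changed: A's while-loop that repeatedly matches a comment prefix with startswith/find and re-slices the string is replaced by a single left-to-right six-state character state machine that computes the cut position in one scan, followed by one slice.
import Mathlib
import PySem

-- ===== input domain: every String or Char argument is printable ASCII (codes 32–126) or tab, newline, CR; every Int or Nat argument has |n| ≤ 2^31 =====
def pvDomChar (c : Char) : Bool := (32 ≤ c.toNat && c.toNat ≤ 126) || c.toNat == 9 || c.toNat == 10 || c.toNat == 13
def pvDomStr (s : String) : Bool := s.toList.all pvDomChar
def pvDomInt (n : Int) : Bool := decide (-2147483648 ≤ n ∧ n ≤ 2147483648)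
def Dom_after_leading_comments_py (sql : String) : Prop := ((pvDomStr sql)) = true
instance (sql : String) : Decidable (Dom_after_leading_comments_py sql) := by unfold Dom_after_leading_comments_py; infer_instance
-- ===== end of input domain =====

-- B replaces A's repeated startswith/find/slice front-stripping loop by a single left-to-right
-- character state machine that computes the cut position in one scan (objective: alternative).

-- ===== PORT A =====

-- s.lstrip("(") — hand port (PySem has no one-sided strip-with-chars): drop leading '(' chars; exact
def pyLstripParen (s : List Char) : List Char := s.dropWhile (fun c => c == '(')

def loopA (s : List Char) : List Char :=
  if _hs : s = [] then s                                   -- while s: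
  else if _h2 : PySem.Chars.startswith s ['-', '-'] then   -- s.startswith("--")
    let nl := PySem.Chars.find s ['\n']                    -- nl = s.find("\n")
    if _hnl : nl = -1 then []                              -- s = "" ; loop re-test fails
    else loopA (PySem.Chars.lstrip (PySem.Chars.slice s (some (nl + 1)) none))
  else if _h3 : PySem.Chars.startswith s ['/', '*'] then   -- s.startswith("/*")
    let e := PySem.Chars.find s ['*', '/']                 -- end = s.find("*/")
    if _he : e = -1 then s                                 -- break
    else loopA (PySem.Chars.lstrip (PySem.Chars.slice s (some (e + 2)) none))
  else s                                                   -- break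
termination_by s.length
decreasing_by
  · have h0 : -1 ≤ PySem.Chars.find s ['\n'] := PySem.Chars.neg_one_le_find s ['\n']
    have h1 : (0 : Int) ≤ PySem.Chars.find s ['\n'] + 1 := by omega
    rw [PySem.Chars.lstrip, PySem.Chars.slice_eq_listSlice, PySem.List.slice_from _ h1]
    have h2 := List.length_dropWhile_le PySem.Chars.isspace (s.drop (PySem.Chars.find s ['\n'] + 1).toNat)
    have h3 : 1 ≤ (PySem.Chars.find s ['\n'] + 1).toNat := by omega
    have h4 : 0 < s.length := List.length_pos_of_ne_nil _hs
    simp only [List.length_drop] at h2 ⊢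
    omega
  · have h0 : -1 ≤ PySem.Chars.find s ['*', '/'] := PySem.Chars.neg_one_le_find s ['*', '/']
    have h1 : (0 : Int) ≤ PySem.Chars.find s ['*', '/'] + 2 := by omega
    rw [PySem.Chars.lstrip, PySem.Chars.slice_eq_listSlice, PySem.List.slice_from _ h1]
    have h2 := List.length_dropWhile_le PySem.Chars.isspace (s.drop (PySem.Chars.find s ['*', '/'] + 2).toNat)
    have h3 : 1 ≤ (PySem.Chars.find s ['*', '/'] + 2).toNat := by omega
    have h4 : 0 < s.length := List.length_pos_of_ne_nil _hs
    simp only [List.length_drop] at h2 ⊢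
    omega

def after_leading_comments_py (sql : String) : String :=
  String.ofList (PySem.Chars.strip (pyLstripParen (loopA (PySem.Chars.strip sql.toList))))

-- ===== PORT B =====

-- the scanner's states (CODE, DASH, SLASH, LINE, BLOCK, BLOCKSTAR in Source B)
inductive BState : Type
  | code | dash | slash | line | block | blockstar
deriving DecidableEq, Repr

-- the for-loop of Source B: chars left, current index i, state, cut; returns the final cut
-- (the [] case is the loop's else-clause: an unfinished '--' comment consumes to the end)
def loopDFA : List Char → Nat → BState → Nat → Nat
  | [], i, st, cut => if st = BState.line then i else cut
  | c :: rest, i, st, cut =>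
    match st with
    | BState.code =>
        if PySem.Chars.isspace c then loopDFA rest (i+1) BState.code (i+1)
        else if c = '-' then loopDFA rest (i+1) BState.dash cut
        else if c = '/' then loopDFA rest (i+1) BState.slash cut
        else cut
    | BState.dash => if c = '-' then loopDFA rest (i+1) BState.line cut else cut
    | BState.slash => if c = '*' then loopDFA rest (i+1) BState.blockstar cut else cut
    | BState.line =>
        if c = '\n' then loopDFA rest (i+1) BState.code (i+1)
        else loopDFA rest (i+1) BState.line cut
    | BState.blockstar =>
        if c = '/' then loopDFA rest (i+1) BState.code (i+1)
        else if c = '*' then loopDFA rest (i+1) BState.blockstar cut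
        else loopDFA rest (i+1) BState.block cut
    | BState.block =>
        if c = '*' then loopDFA rest (i+1) BState.blockstar cut
        else loopDFA rest (i+1) BState.block cut

def after_leading_comments_py_alt (sql : String) : String :=
  String.ofList (PySem.Chars.strip (pyLstripParen
    (sql.toList.drop (loopDFA sql.toList 0 BState.code 0))))

-- ===== PRECONDITION & SPEC =====
def Spec_after_leading_comments_py (sql : String) (out : String) : Prop := out = after_leading_comments_py_alt sql
instance (sql : String) (out : String) : Decidable (Spec_after_leading_comments_py sql out) := by unfold Spec_after_leading_comments_py; infer_instance

-- ===== CLAIM (what is proved, stated in full; the proofs are below) =====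
def Claim_equal_after_leading_comments_py : Prop := ∀ (sql : String), Dom_after_leading_comments_py sql → Spec_after_leading_comments_py sql (after_leading_comments_py sql)

-- ===== LEMMAS AND PROOFS =====

-- find points at the unique first occurrence
theorem find_eq_of (s sub : List Char) (j : Nat) (hj : sub <+: s.drop j)
    (hmin : ∀ i, i < j → ¬ sub <+: s.drop i) : PySem.Chars.find s sub = (j : Int) := by
  have hin : PySem.Chars.isIn sub s = true :=
    (PySem.Chars.exists_prefix_drop_iff_isIn sub s).mp ⟨j, hj⟩
  have hne : PySem.Chars.find s sub ≠ -1 :=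
    (PySem.Chars.find_ne_neg_one_iff s sub).mpr ((PySem.Chars.isIn_iff_infix sub s).mp hin)
  have h0 : 0 ≤ PySem.Chars.find s sub := by
    have := PySem.Chars.neg_one_le_find s sub; omega
  obtain ⟨hpre, hlt⟩ := PySem.Chars.find_spec h0
  have : (PySem.Chars.find s sub).toNat = j := by
    rcases Nat.lt_trichotomy (PySem.Chars.find s sub).toNat j with h | h | h
    · exact absurd hpre (hmin _ h)
    · exact h
    · exact absurd hj (hlt j h)
  omega

-- a find with no occurrence anywhere is -1
theorem find_eq_neg_one_of (s sub : List Char) (h : ∀ j, ¬ sub <+: s.drop j) :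
    PySem.Chars.find s sub = -1 := by
  rw [PySem.Chars.find_eq_neg_one_iff]
  intro hinf
  obtain ⟨j, hj⟩ := (PySem.Chars.exists_prefix_drop_iff_isIn sub s).mpr
    ((PySem.Chars.isIn_iff_infix sub s).mpr hinf)
  exact h j hj

-- find of a needle whose first char misses the head steps into the tail
theorem find_cons (x : Char) (xs sub : List Char) (h : ¬ sub <+: (x :: xs)) :
    PySem.Chars.find (x :: xs) sub =
      if PySem.Chars.find xs sub = -1 then -1 else 1 + PySem.Chars.find xs sub := by
  by_cases hx : PySem.Chars.find xs sub = -1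
  · rw [if_pos hx]
    rw [PySem.Chars.find_eq_neg_one_iff]
    rw [PySem.Chars.find_eq_neg_one_iff] at hx
    intro hinf
    rcases List.infix_cons_iff.mp hinf with hp | hi
    · exact h hp
    · exact hx hi
  · rw [if_neg hx]
    have h0 : 0 ≤ PySem.Chars.find xs sub := by
      have := PySem.Chars.neg_one_le_find xs sub; omega
    obtain ⟨hpre, hlt⟩ := PySem.Chars.find_spec h0
    have := find_eq_of (x :: xs) sub ((PySem.Chars.find xs sub).toNat + 1)
      (by simpa using hpre)
      (by
        intro i hi
        cases i with
        | zero => simpa using h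
        | succ i =>
          have : i < (PySem.Chars.find xs sub).toNat := by omega
          simpa using hlt i this)
    rw [this]; omega

-- find of a single present character counts the chars before its first occurrence
theorem find_singleton_mem (s : List Char) (c : Char) (hc : c ∈ s) :
    PySem.Chars.find s [c] = ((s.takeWhile (fun x => x != c)).length : Int) := by
  induction s with
  | nil => cases hc
  | cons x xs ih =>
    by_cases hx : x = c
    · subst hx
      have := find_eq_of (x :: xs) [x] 0 (by simp) (by omega)
      simpa using this
    · have hcxs : c ∈ xs := by
        rcases List.mem_cons.mp hc with h | h
        · exact absurd h.symm hx
        · exact h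
      have hnp : ¬ [c] <+: (x :: xs) := by
        intro hp
        obtain ⟨t2, ht⟩ := hp
        injection ht with h1 _
        exact hx h1.symm
      rw [find_cons x xs [c] hnp, ih hcxs]
      have hb : (x != c) = true := by simpa using hx
      simp [hb]
      omega

-- find of a single absent character is -1
theorem find_singleton_not_mem (s : List Char) (c : Char) (hc : c ∉ s) :
    PySem.Chars.find s [c] = -1 := by
  rw [PySem.Chars.find_eq_neg_one_iff]
  intro hinf
  exact hc (hinf.mem (by simp))

-- "*/" occurs in s at offset j
def occAt (s : List Char) (j : Nat) : Prop := ['*', '/'] <+: s.drop j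

theorem occAt_cons_succ (x : Char) (s : List Char) (j : Nat) :
    occAt (x :: s) (j + 1) ↔ occAt s j := by simp [occAt]

theorem occAt_zero_cons_cons (a b : Char) (u : List Char) :
    occAt (a :: b :: u) 0 ↔ a = '*' ∧ b = '/' := by
  constructor
  · intro h
    obtain ⟨t2, ht⟩ := h
    injection ht with h1 ht; injection ht with h2 _
    exact ⟨h1.symm, h2.symm⟩
  · rintro ⟨rfl, rfl⟩
    exact ⟨u, rfl⟩

theorem not_occAt_short (s : List Char) (j : Nat) (h : s.length ≤ j + 1) : ¬ occAt s j := by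
  intro hp
  have := hp.length_le
  simp [List.length_drop] at this
  omega

mutual
-- scanning for the comment close from "just saw '*'": chars consumed until the closing '/'
def close? : List Char → Option Nat
  | [] => none
  | c :: r =>
      if c = '/' then some 0
      else if c = '*' then (close? r).map (· + 1)
      else (closeB? r).map (· + 1)
-- the same scan from "last char was not '*'"
def closeB? : List Char → Option Nat
  | [] => none
  | c :: r =>
      if c = '*' then (close? r).map (· + 1)
      else (closeB? r).map (· + 1)
end

-- close?/closeB? find exactly the first "*/" occurrence ('*'::t carries the already-seen star)
theorem closeSpec : ∀ t : List Char,
    ((∀ q, close? t = some q → occAt ('*' :: t) q ∧ ∀ j, j < q → ¬ occAt ('*' :: t) j) ∧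
     (close? t = none → ∀ j, ¬ occAt ('*' :: t) j)) ∧
    ((∀ q, closeB? t = some q → ∃ p, q = p + 1 ∧ occAt t p ∧ ∀ j, j < p → ¬ occAt t j) ∧
     (closeB? t = none → ∀ j, ¬ occAt t j)) := by
  intro t
  induction t with
  | nil =>
    refine ⟨⟨?_, ?_⟩, ⟨?_, ?_⟩⟩
    · intro q hq; simp [close?] at hq
    · intro _ j
      cases j with
      | zero => exact not_occAt_short _ _ (by simp)
      | succ j => rw [occAt_cons_succ]; simp [occAt]
    · intro q hq; simp [closeB?] at hq
    · intro _ j; simp [occAt]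
  | cons c r ih =>
    obtain ⟨⟨ihCs, ihCn⟩, ⟨ihBs, ihBn⟩⟩ := ih
    refine ⟨⟨?_, ?_⟩, ⟨?_, ?_⟩⟩
    · -- close? some
      intro q hq
      by_cases h1 : c = '/'
      · subst h1
        rw [show close? ('/' :: r) = some 0 by simp [close?]] at hq
        injection hq with hq
        subst hq
        exact ⟨(occAt_zero_cons_cons _ _ _).mpr ⟨rfl, rfl⟩, fun j hj => absurd hj (by omega)⟩
      by_cases h2 : c = '*'
      · subst h2
        simp [close?, h1] at hq
        obtain ⟨q', hq', rfl⟩ := hq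
        obtain ⟨ho, hm⟩ := ihCs q' hq'
        refine ⟨(occAt_cons_succ _ _ _).mpr ho, ?_⟩
        intro j hj
        cases j with
        | zero =>
          rw [occAt_zero_cons_cons]; rintro ⟨_, h⟩; exact absurd h (by decide)
        | succ j => rw [occAt_cons_succ]; exact hm j (by omega)
      · simp [close?, h1, h2] at hq
        obtain ⟨q', hq', rfl⟩ := hq
        obtain ⟨p, rfl, ho, hm⟩ := ihBs q' hq'
        refine ⟨?_, ?_⟩
        · rw [show p + 1 + 1 = (p + 1) + 1 from rfl, occAt_cons_succ, occAt_cons_succ]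
          exact ho
        intro j hj
        match j with
        | 0 => rw [occAt_zero_cons_cons]; rintro ⟨_, h⟩; exact absurd h h1
        | 1 =>
          rw [occAt_cons_succ]
          cases r with
          | nil => exact not_occAt_short _ _ (by simp)
          | cons b u => rw [occAt_zero_cons_cons]; rintro ⟨h, _⟩; exact absurd h h2
        | (j + 2) =>
          rw [occAt_cons_succ, occAt_cons_succ]
          exact hm j (by omega)
    · -- close? none
      intro hn j
      by_cases h1 : c = '/'
      · simp [close?, h1] at hn
      by_cases h2 : c = '*'
      · subst h2
        simp [close?, h1] at hn
        have := ihCn hn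
        match j with
        | 0 => rw [occAt_zero_cons_cons]; rintro ⟨_, h⟩; exact absurd h (by decide)
        | (j + 1) => rw [occAt_cons_succ]; exact this j
      · simp [close?, h1, h2] at hn
        have := ihBn hn
        match j with
        | 0 => rw [occAt_zero_cons_cons]; rintro ⟨_, h⟩; exact absurd h h1
        | 1 =>
          rw [occAt_cons_succ]
          cases r with
          | nil => exact not_occAt_short _ _ (by simp)
          | cons b u => rw [occAt_zero_cons_cons]; rintro ⟨h, _⟩; exact absurd h h2
        | (j + 2) => rw [occAt_cons_succ, occAt_cons_succ]; exact this j
    · -- closeB? some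
      intro q hq
      by_cases h2 : c = '*'
      · subst h2
        simp [closeB?] at hq
        obtain ⟨q', hq', rfl⟩ := hq
        obtain ⟨ho, hm⟩ := ihCs q' hq'
        exact ⟨q', rfl, ho, hm⟩
      · simp [closeB?, h2] at hq
        obtain ⟨q', hq', rfl⟩ := hq
        obtain ⟨p, rfl, ho, hm⟩ := ihBs q' hq'
        refine ⟨p + 1, rfl, (occAt_cons_succ _ _ _).mpr ho, ?_⟩
        intro j hj
        match j with
        | 0 =>
          cases r with
          | nil => exact not_occAt_short _ _ (by simp)
          | cons b u => rw [occAt_zero_cons_cons]; rintro ⟨h, _⟩; exact absurd h h2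
        | (j + 1) => rw [occAt_cons_succ]; exact hm j (by omega)
    · -- closeB? none
      intro hn j
      by_cases h2 : c = '*'
      · subst h2
        simp [closeB?] at hn
        have := ihCn hn
        exact this j
      · simp [closeB?, h2] at hn
        have := ihBn hn
        match j with
        | 0 =>
          cases r with
          | nil => exact not_occAt_short _ _ (by simp)
          | cons b u => rw [occAt_zero_cons_cons]; rintro ⟨h, _⟩; exact absurd h h2
        | (j + 1) => rw [occAt_cons_succ]; exact this j

theorem find_star_some (t : List Char) (q : Nat) (h : close? t = some q) :
    PySem.Chars.find ('*' :: t) ['*', '/'] = (q : Int) := by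
  obtain ⟨ho, hm⟩ := (closeSpec t).1.1 q h
  exact find_eq_of _ _ q ho hm

theorem find_star_none (t : List Char) (h : close? t = none) :
    PySem.Chars.find ('*' :: t) ['*', '/'] = -1 :=
  find_eq_neg_one_of _ _ ((closeSpec t).1.2 h)

theorem close?_le (t : List Char) (q : Nat) (h : close? t = some q) : q + 1 ≤ t.length := by
  obtain ⟨ho, _⟩ := (closeSpec t).1.1 q h
  have := ho.length_le
  simp [List.length_drop] at this
  omega

-- the LINE state runs to the first newline (or to the end of the string)
theorem lineRun : ∀ (t : List Char) (i cut : Nat),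
    loopDFA t i BState.line cut =
      if '\n' ∈ t then
        loopDFA (t.drop ((t.takeWhile (fun x => x != '\n')).length + 1))
          (i + (t.takeWhile (fun x => x != '\n')).length + 1) BState.code
          (i + (t.takeWhile (fun x => x != '\n')).length + 1)
      else i + t.length := by
  intro t
  induction t with
  | nil => intro i cut; simp [loopDFA]
  | cons c r ih =>
    intro i cut
    by_cases h : c = '\n'
    · subst h
      simp [loopDFA, List.takeWhile]
    · have hb : (c != '\n') = true := by simpa using h
      have hm : ('\n' ∈ c :: r) = ('\n' ∈ r) := by
        simp [List.mem_cons, Ne.symm h]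
      rw [show loopDFA (c :: r) i BState.line cut = loopDFA r (i+1) BState.line cut by
            simp [loopDFA, h]]
      rw [ih (i+1) cut]
      simp only [hm, List.takeWhile_cons, hb, if_true, List.length_cons]
      by_cases hmem : '\n' ∈ r
      · simp only [hmem, if_true, List.drop_succ_cons]
        have : i + 1 + (r.takeWhile (fun x => x != '\n')).length + 1
             = i + ((r.takeWhile (fun x => x != '\n')).length + 1) + 1 := by omega
        rw [this]
      · simp only [hmem, if_false]
        omega

-- the BLOCK/BLOCKSTAR states run to the close?-/closeB?-found "*/" (or keep cut at EOF)
theorem blockRun : ∀ (t : List Char) (i cut : Nat),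
    (loopDFA t i BState.blockstar cut =
       match close? t with
       | some q => loopDFA (t.drop (q+1)) (i+q+1) BState.code (i+q+1)
       | none => cut) ∧
    (loopDFA t i BState.block cut =
       match closeB? t with
       | some q => loopDFA (t.drop (q+1)) (i+q+1) BState.code (i+q+1)
       | none => cut) := by
  intro t
  induction t with
  | nil => intro i cut; constructor <;> simp [loopDFA, close?, closeB?]
  | cons c r ih =>
    intro i cut
    constructor
    · by_cases h1 : c = '/'
      · subst h1; simp [loopDFA, close?]
      by_cases h2 : c = '*'
      · subst h2
        rw [show loopDFA ('*' :: r) i BState.blockstar cut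
              = loopDFA r (i+1) BState.blockstar cut by simp [loopDFA, h1]]
        rw [(ih (i+1) cut).1]
        cases hc : close? r with
        | none => rw [show close? ('*' :: r) = none by simp [close?, hc]]
        | some q =>
          rw [show close? ('*' :: r) = some (q + 1) by simp [close?, hc]]
          simp only [List.drop_succ_cons]
          rw [show i + (q + 1) + 1 = i + 1 + q + 1 by omega]
      · rw [show loopDFA (c :: r) i BState.blockstar cut
              = loopDFA r (i+1) BState.block cut by simp [loopDFA, h1, h2]]
        rw [(ih (i+1) cut).2]
        cases hc : closeB? r with
        | none => rw [show close? (c :: r) = none by simp [close?, h1, h2, hc]]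
        | some q =>
          rw [show close? (c :: r) = some (q + 1) by simp [close?, h1, h2, hc]]
          simp only [List.drop_succ_cons]
          rw [show i + (q + 1) + 1 = i + 1 + q + 1 by omega]
    · by_cases h2 : c = '*'
      · subst h2
        rw [show loopDFA ('*' :: r) i BState.block cut
              = loopDFA r (i+1) BState.blockstar cut by simp [loopDFA]]
        rw [(ih (i+1) cut).1]
        cases hc : close? r with
        | none => rw [show closeB? ('*' :: r) = none by simp [closeB?, hc]]
        | some q =>
          rw [show closeB? ('*' :: r) = some (q + 1) by simp [closeB?, hc]]
          simp only [List.drop_succ_cons]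
          rw [show i + (q + 1) + 1 = i + 1 + q + 1 by omega]
      · rw [show loopDFA (c :: r) i BState.block cut
              = loopDFA r (i+1) BState.block cut by simp [loopDFA, h2]]
        rw [(ih (i+1) cut).2]
        cases hc : closeB? r with
        | none => rw [show closeB? (c :: r) = none by simp [closeB?, h2, hc]]
        | some q =>
          rw [show closeB? (c :: r) = some (q + 1) by simp [closeB?, h2, hc]]
          simp only [List.drop_succ_cons]
          rw [show i + (q + 1) + 1 = i + 1 + q + 1 by omega]


-- whitespace-tail toolkit
theorem ws_ne (w : List Char) (hw : w.all PySem.Chars.isspace = true) (c : Char)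
    (hc : PySem.Chars.isspace c = false) (h : c ∈ w) : False := by
  rw [List.all_eq_true] at hw
  exact absurd (hw c h) (by simp [hc])

theorem dropWhile_ws_of_all (w : List Char) (hw : w.all PySem.Chars.isspace = true) :
    w.dropWhile PySem.Chars.isspace = [] := by
  rw [List.dropWhile_eq_nil_iff]
  rw [List.all_eq_true] at hw
  exact hw

theorem all_ws_drop (w : List Char) (k : Nat) (hw : w.all PySem.Chars.isspace = true) :
    (w.drop k).all PySem.Chars.isspace = true := by
  rw [List.all_eq_true] at hw ⊢
  exact fun c hc => hw c (List.mem_of_mem_drop hc)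

theorem rstrip_append_ws (z w : List Char) (hw : w.all PySem.Chars.isspace = true) :
    PySem.Chars.rstrip (z ++ w) = PySem.Chars.rstrip z := by
  rw [PySem.Chars.rstrip, PySem.Chars.rstrip, List.reverse_append, List.dropWhile_append]
  rw [dropWhile_ws_of_all w.reverse (by simpa using hw)]
  simp

theorem strip_all_ws (w : List Char) (hw : w.all PySem.Chars.isspace = true) :
    PySem.Chars.strip w = [] := by
  rw [PySem.Chars.strip, PySem.Chars.lstrip, dropWhile_ws_of_all w hw]
  rfl

theorem strip_append_ws (z w : List Char) (hw : w.all PySem.Chars.isspace = true) :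
    PySem.Chars.strip (z ++ w) = PySem.Chars.strip z := by
  rw [PySem.Chars.strip, PySem.Chars.strip, PySem.Chars.lstrip, PySem.Chars.lstrip,
    List.dropWhile_append]
  by_cases h : (z.dropWhile PySem.Chars.isspace).isEmpty
  · rw [if_pos h, dropWhile_ws_of_all w hw, List.isEmpty_iff.mp h]
  · rw [if_neg h]
    exact rstrip_append_ws _ _ hw

theorem dropWhile_paren_ws (w : List Char) (hw : w.all PySem.Chars.isspace = true) :
    w.dropWhile (fun c => c == '(') = w := by
  cases w with
  | nil => rfl
  | cons c r =>
    by_cases hc : c = '('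
    · subst hc
      exact absurd (ws_ne _ hw '(' (by decide) (by simp)) (fun h => h)
    · simp [List.dropWhile_cons, hc]

-- a two-char needle with non-space second char cannot reach into a whitespace tail
theorem prefix2_append_ws (a b : Char) (x w : List Char)
    (hw : w.all PySem.Chars.isspace = true) (hb : PySem.Chars.isspace b = false) :
    ([a, b] <+: x ++ w) ↔ [a, b] <+: x := by
  match x with
  | [] =>
    simp only [List.nil_append]
    constructor
    · intro h
      obtain ⟨u, hu⟩ := h
      exact absurd (ws_ne w hw b hb (by rw [← hu]; simp)) (fun h => h)
    · intro h
      exact absurd h.length_le (by simp)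
  | [x1] =>
    constructor
    · intro h
      rw [List.singleton_append, List.cons_prefix_cons] at h
      obtain ⟨u, hu⟩ := h.2
      exact absurd (ws_ne w hw b hb (by rw [← hu]; simp)) (fun h => h)
    · intro h
      exact absurd h.length_le (by simp)
  | x1 :: x2 :: x' =>
    simp [List.cons_prefix_cons]

theorem startswith_append_ws (a b : Char) (x w : List Char)
    (hw : w.all PySem.Chars.isspace = true) (hb : PySem.Chars.isspace b = false) :
    PySem.Chars.startswith (x ++ w) [a, b] = PySem.Chars.startswith x [a, b] := by
  rw [Bool.eq_iff_iff, PySem.Chars.startswith_iff, PySem.Chars.startswith_iff]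
  exact prefix2_append_ws a b x w hw hb

theorem takeWhile_nl_append_of_mem (x w : List Char) (hm : '\n' ∈ x) :
    (x ++ w).takeWhile (fun y => y != '\n') = x.takeWhile (fun y => y != '\n') := by
  induction x with
  | nil => cases hm
  | cons a x0 ih =>
    by_cases ha : a = '\n'
    · subst ha
      simp [List.takeWhile_cons]
    · have hb : (a != '\n') = true := by simpa using ha
      have hm0 : '\n' ∈ x0 := by
        rcases List.mem_cons.mp hm with h | h
        · exact absurd h.symm ha
        · exact h
      simp [List.takeWhile_cons, hb, ih hm0]

theorem takeWhile_nl_append_of_not_mem (x w : List Char) (hm : '\n' ∉ x) :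
    (x ++ w).takeWhile (fun y => y != '\n') = x ++ w.takeWhile (fun y => y != '\n') := by
  induction x with
  | nil => simp
  | cons a x0 ih =>
    have ha : a ≠ '\n' := fun h => hm (by rw [h]; simp)
    have hb : (a != '\n') = true := by simpa using ha
    have hm0 : '\n' ∉ x0 := fun h => hm (by simp [h])
    simp [List.takeWhile_cons, hb, ih hm0]

theorem takeWhile_nl_lt_length (x : List Char) (hm : '\n' ∈ x) :
    (x.takeWhile (fun y => y != '\n')).length < x.length := by
  induction x with
  | nil => cases hm
  | cons a x0 ih =>
    by_cases ha : a = '\n'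
    · subst ha
      simp [List.takeWhile_cons]
    · have hb : (a != '\n') = true := by simpa using ha
      have hm0 : '\n' ∈ x0 := by
        rcases List.mem_cons.mp hm with h | h
        · exact absurd h.symm ha
        · exact h
      simp only [List.takeWhile_cons, hb, if_true, List.length_cons]
      exact Nat.succ_lt_succ (ih hm0)

theorem occAt_append_ws (x w : List Char) (j : Nat)
    (hw : w.all PySem.Chars.isspace = true) : occAt (x ++ w) j ↔ occAt x j := by
  by_cases hj : j ≤ x.length
  · rw [occAt, occAt, List.drop_append_of_le_length hj]
    exact prefix2_append_ws '*' '/' (x.drop j) w hw (by decide)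
  · push Not at hj
    constructor
    · intro h
      exfalso
      rw [occAt, show j = x.length + (j - x.length) by omega,
        List.drop_length_add_append] at h
      obtain ⟨u, hu⟩ := h
      have hmem : '*' ∈ w.drop (j - x.length) := by rw [← hu]; simp
      exact ws_ne w hw '*' (by decide) (List.mem_of_mem_drop hmem)
    · intro h
      exact absurd h (not_occAt_short x j (by omega))

theorem find_ss_append (x w : List Char) (hw : w.all PySem.Chars.isspace = true) :
    PySem.Chars.find (x ++ w) ['*', '/'] = PySem.Chars.find x ['*', '/'] := by
  by_cases hx : PySem.Chars.find x ['*', '/'] = -1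
  · rw [hx]
    apply find_eq_neg_one_of
    intro j hp
    have hocc : occAt x j := (occAt_append_ws x w j hw).mp hp
    rw [PySem.Chars.find_eq_neg_one_iff] at hx
    exact hx ((PySem.Chars.isIn_iff_infix _ _).mp
      ((PySem.Chars.exists_prefix_drop_iff_isIn _ _).mp ⟨j, hocc⟩))
  · have h0 : 0 ≤ PySem.Chars.find x ['*', '/'] := by
      have := PySem.Chars.neg_one_le_find x ['*', '/']; omega
    obtain ⟨hpre, hmin⟩ := PySem.Chars.find_spec h0
    rw [find_eq_of (x ++ w) ['*', '/'] (PySem.Chars.find x ['*', '/']).toNat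
      ((occAt_append_ws x w _ hw).mpr hpre)
      (fun i hi hp => hmin i hi ((occAt_append_ws x w i hw).mp hp))]
    omega

-- a whitespace-only string is left untouched by A's loop
theorem loopA_of_ws (w : List Char) (hw : w.all PySem.Chars.isspace = true) :
    loopA w = w := by
  cases w with
  | nil => rw [loopA]; simp
  | cons c r =>
    have h2 : ¬ PySem.Chars.startswith (c :: r) ['-', '-'] = true := by
      intro h
      obtain ⟨t, ht⟩ := (PySem.Chars.startswith_iff _ _).mp h
      injection ht with hc _
      subst hc
      exact ws_ne _ hw '-' (by decide) (by simp)
    have h3 : ¬ PySem.Chars.startswith (c :: r) ['/', '*'] = true := by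
      intro h
      obtain ⟨t, ht⟩ := (PySem.Chars.startswith_iff _ _).mp h
      injection ht with hc _
      subst hc
      exact ws_ne _ hw '/' (by decide) (by simp)
    rw [loopA, dif_neg (by simp : ¬ (c :: r) = []), dif_neg h2, dif_neg h3]

-- loopA is blind to an all-whitespace tail (result-wise, up to such a tail)
theorem loopA_append_ws : ∀ (n : Nat) (x w : List Char), x.length ≤ n →
    w.all PySem.Chars.isspace = true →
    ∃ w' : List Char, w'.all PySem.Chars.isspace = true ∧
      loopA (x ++ w) = loopA x ++ w' := by
  intro n
  induction n with
  | zero =>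
    intro x w hx hw
    have hx0 : x = [] := List.eq_nil_of_length_eq_zero (by omega)
    subst hx0
    refine ⟨w, hw, ?_⟩
    rw [List.nil_append, loopA_of_ws w hw, loopA, dif_pos rfl, List.nil_append]
  | succ n ih =>
    intro x w hx hw
    cases x with
    | nil =>
      refine ⟨w, hw, ?_⟩
      rw [List.nil_append, loopA_of_ws w hw, loopA, dif_pos rfl, List.nil_append]
    | cons c x0 =>
      have hnx : (c :: x0) ≠ [] := by simp
      have hnxw : (c :: x0) ++ w ≠ [] := by simp
      by_cases h2 : PySem.Chars.startswith (c :: x0) ['-', '-'] = true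
      · have h2' : PySem.Chars.startswith ((c :: x0) ++ w) ['-', '-'] = true := by
          rw [startswith_append_ws '-' '-' _ w hw (by decide)]; exact h2
        by_cases hm : '\n' ∈ (c :: x0)
        · have hf1 : PySem.Chars.find (c :: x0) ['\n']
              = (((c :: x0).takeWhile (fun y => y != '\n')).length : Int) :=
            find_singleton_mem _ _ hm
          have hf2 : PySem.Chars.find ((c :: x0) ++ w) ['\n']
              = (((c :: x0).takeWhile (fun y => y != '\n')).length : Int) := by
            rw [find_singleton_mem _ _ (List.mem_append_left w hm),
              takeWhile_nl_append_of_mem _ w hm]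
          set p := ((c :: x0).takeWhile (fun y => y != '\n')).length with hp
          have hplt : p < (c :: x0).length := takeWhile_nl_lt_length _ hm
          have hA1 : loopA ((c :: x0) ++ w)
              = loopA (PySem.Chars.lstrip (((c :: x0).drop (p + 1)) ++ w)) := by
            rw [loopA, dif_neg hnxw, dif_pos h2']
            simp only [hf2]
            rw [dif_neg (by omega : ¬((p : Int) = -1))]
            rw [PySem.Chars.slice_eq_listSlice, PySem.List.slice_from _ (by omega)]
            rw [show ((p : Int) + 1).toNat = p + 1 by omega]
            rw [List.drop_append_of_le_length (by simpa using hplt)]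
          have hA2 : loopA (c :: x0)
              = loopA (PySem.Chars.lstrip ((c :: x0).drop (p + 1))) := by
            rw [loopA, dif_neg hnx, dif_pos h2]
            simp only [hf1]
            rw [dif_neg (by omega : ¬((p : Int) = -1))]
            rw [PySem.Chars.slice_eq_listSlice, PySem.List.slice_from _ (by omega)]
            rw [show ((p : Int) + 1).toNat = p + 1 by omega]
          rw [hA1, hA2, PySem.Chars.lstrip, PySem.Chars.lstrip, List.dropWhile_append]
          by_cases hes : (((c :: x0).drop (p + 1)).dropWhile PySem.Chars.isspace).isEmpty
          · rw [if_pos hes, dropWhile_ws_of_all w hw, List.isEmpty_iff.mp hes]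
            exact ⟨[], by simp, by simp⟩
          · rw [if_neg hes]
            have hlen : (((c :: x0).drop (p + 1)).dropWhile PySem.Chars.isspace).length ≤ n := by
              have h1 := List.length_dropWhile_le PySem.Chars.isspace ((c :: x0).drop (p + 1))
              simp only [List.length_drop, List.length_cons] at h1
              simp only [List.length_cons] at hx hplt
              omega
            exact ih _ w hlen hw
        · have hf1 : PySem.Chars.find (c :: x0) ['\n'] = -1 := find_singleton_not_mem _ _ hm
          have hA2 : loopA (c :: x0) = [] := by
            rw [loopA, dif_neg hnx, dif_pos h2]
            simp only [hf1]
            simp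
          by_cases hmw : '\n' ∈ w
          · have ht : ((c :: x0) ++ w).takeWhile (fun y => y != '\n')
                = (c :: x0) ++ w.takeWhile (fun y => y != '\n') :=
              takeWhile_nl_append_of_not_mem _ _ hm
            set pw := (w.takeWhile (fun y => y != '\n')).length with hpw
            have hf2 : PySem.Chars.find ((c :: x0) ++ w) ['\n']
                = (((c :: x0).length + pw : Nat) : Int) := by
              rw [find_singleton_mem _ _ (List.mem_append_right _ hmw), ht]
              simp [hpw]
              omega
            have hA1 : loopA ((c :: x0) ++ w)
                = loopA (PySem.Chars.lstrip (w.drop (pw + 1))) := by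
              rw [loopA, dif_neg hnxw, dif_pos h2']
              simp only [hf2]
              rw [dif_neg (by omega : ¬((((c :: x0).length + pw : Nat) : Int) = -1))]
              rw [PySem.Chars.slice_eq_listSlice, PySem.List.slice_from _ (by omega)]
              rw [show ((((c :: x0).length + pw : Nat) : Int) + 1).toNat
                  = (c :: x0).length + (pw + 1) by omega]
              rw [List.drop_length_add_append]
            refine ⟨[], by simp, ?_⟩
            rw [hA1, hA2, PySem.Chars.lstrip,
              dropWhile_ws_of_all _ (all_ws_drop w (pw + 1) hw), loopA, dif_pos rfl]
            simp
          · have hf2 : PySem.Chars.find ((c :: x0) ++ w) ['\n'] = -1 :=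
              find_singleton_not_mem _ _ (by
                rw [List.mem_append]
                rintro (h | h)
                · exact hm h
                · exact hmw h)
            have hA1 : loopA ((c :: x0) ++ w) = [] := by
              rw [loopA, dif_neg hnxw, dif_pos h2']
              simp only [hf2]
              simp
            exact ⟨[], by simp, by rw [hA1, hA2]; simp⟩
      · have h2' : ¬ PySem.Chars.startswith ((c :: x0) ++ w) ['-', '-'] = true := by
          rw [startswith_append_ws '-' '-' _ w hw (by decide)]; exact h2
        by_cases h3 : PySem.Chars.startswith (c :: x0) ['/', '*'] = true
        · have h3' : PySem.Chars.startswith ((c :: x0) ++ w) ['/', '*'] = true := by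
            rw [startswith_append_ws '/' '*' _ w hw (by decide)]; exact h3
          by_cases hfe : PySem.Chars.find (c :: x0) ['*', '/'] = -1
          · have hf2 : PySem.Chars.find ((c :: x0) ++ w) ['*', '/'] = -1 := by
              rw [find_ss_append _ _ hw]; exact hfe
            have hA1 : loopA ((c :: x0) ++ w) = (c :: x0) ++ w := by
              rw [loopA, dif_neg hnxw, dif_neg h2', dif_pos h3']
              simp only [hf2]
              simp
            have hA2 : loopA (c :: x0) = (c :: x0) := by
              rw [loopA, dif_neg hnx, dif_neg h2, dif_pos h3]
              simp only [hfe]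
              simp
            exact ⟨w, hw, by rw [hA1, hA2]⟩
          · have h0 : 0 ≤ PySem.Chars.find (c :: x0) ['*', '/'] := by
              have := PySem.Chars.neg_one_le_find (c :: x0) ['*', '/']; omega
            set q := (PySem.Chars.find (c :: x0) ['*', '/']).toNat with hq
            obtain ⟨hpre, _⟩ := PySem.Chars.find_spec h0
            have hqlen : q + 2 ≤ (c :: x0).length := by
              have := hpre.length_le
              simp only [List.length_drop, List.length_cons] at this ⊢
              have h2q := PySem.Chars.find_le_length (c :: x0) ['*', '/']
              simp only [List.length_cons] at h2q
              omega
            have hf2 : PySem.Chars.find ((c :: x0) ++ w) ['*', '/']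
                = PySem.Chars.find (c :: x0) ['*', '/'] := find_ss_append _ _ hw
            have hA1 : loopA ((c :: x0) ++ w)
                = loopA (PySem.Chars.lstrip (((c :: x0).drop (q + 2)) ++ w)) := by
              rw [loopA, dif_neg hnxw, dif_neg h2', dif_pos h3']
              simp only [hf2]
              rw [dif_neg hfe]
              rw [PySem.Chars.slice_eq_listSlice, PySem.List.slice_from _ (by omega)]
              rw [show (PySem.Chars.find (c :: x0) ['*', '/'] + 2).toNat = q + 2 by omega]
              rw [List.drop_append_of_le_length hqlen]
            have hA2 : loopA (c :: x0)
                = loopA (PySem.Chars.lstrip ((c :: x0).drop (q + 2))) := by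
              rw [loopA, dif_neg hnx, dif_neg h2, dif_pos h3]
              rw [dif_neg hfe]
              rw [PySem.Chars.slice_eq_listSlice, PySem.List.slice_from _ (by omega)]
              rw [show (PySem.Chars.find (c :: x0) ['*', '/'] + 2).toNat = q + 2 by omega]
            rw [hA1, hA2, PySem.Chars.lstrip, PySem.Chars.lstrip, List.dropWhile_append]
            by_cases hes : (((c :: x0).drop (q + 2)).dropWhile PySem.Chars.isspace).isEmpty
            · rw [if_pos hes, dropWhile_ws_of_all w hw, List.isEmpty_iff.mp hes]
              exact ⟨[], by simp, by simp⟩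
            · rw [if_neg hes]
              have hlen : (((c :: x0).drop (q + 2)).dropWhile PySem.Chars.isspace).length ≤ n := by
                have h1 := List.length_dropWhile_le PySem.Chars.isspace ((c :: x0).drop (q + 2))
                simp only [List.length_drop, List.length_cons] at h1
                simp only [List.length_cons] at hx hqlen
                omega
              exact ih _ w hlen hw
        · have h3' : ¬ PySem.Chars.startswith ((c :: x0) ++ w) ['/', '*'] = true := by
            rw [startswith_append_ws '/' '*' _ w hw (by decide)]; exact h3
          have hA1 : loopA ((c :: x0) ++ w) = (c :: x0) ++ w := by
            rw [loopA, dif_neg hnxw, dif_neg h2', dif_neg h3']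
          have hA2 : loopA (c :: x0) = (c :: x0) := by
            rw [loopA, dif_neg hnx, dif_neg h2, dif_neg h3]
          exact ⟨w, hw, by rw [hA1, hA2]⟩


-- the final lstrip('(') + strip() ignore an all-whitespace tail
theorem post_append_ws (r w : List Char) (hw : w.all PySem.Chars.isspace = true) :
    PySem.Chars.strip (pyLstripParen (r ++ w)) = PySem.Chars.strip (pyLstripParen r) := by
  rw [pyLstripParen, pyLstripParen, List.dropWhile_append]
  by_cases h : (r.dropWhile (fun c => c == '(')).isEmpty
  · rw [if_pos h, dropWhile_paren_ws w hw, List.isEmpty_iff.mp h, strip_all_ws w hw]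
    rfl
  · rw [if_neg h]
    exact strip_append_ws _ _ hw


-- one unfolding step of the scanner in each state
theorem dfa_step_code (c : Char) (rest : List Char) (i cut : Nat) :
    loopDFA (c :: rest) i BState.code cut =
      if PySem.Chars.isspace c then loopDFA rest (i+1) BState.code (i+1)
      else if c = '-' then loopDFA rest (i+1) BState.dash cut
      else if c = '/' then loopDFA rest (i+1) BState.slash cut
      else cut := rfl

theorem dfa_step_dash (c : Char) (rest : List Char) (i cut : Nat) :
    loopDFA (c :: rest) i BState.dash cut =
      if c = '-' then loopDFA rest (i+1) BState.line cut else cut := rfl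

theorem dfa_step_slash (c : Char) (rest : List Char) (i cut : Nat) :
    loopDFA (c :: rest) i BState.slash cut =
      if c = '*' then loopDFA rest (i+1) BState.blockstar cut else cut := rfl

theorem blockRun_some (t : List Char) (i cut q : Nat) (hc : close? t = some q) :
    loopDFA t i BState.blockstar cut
      = loopDFA (t.drop (q+1)) (i+q+1) BState.code (i+q+1) := by
  rw [(blockRun t i cut).1, hc]

theorem blockRun_none (t : List Char) (i cut : Nat) (hc : close? t = none) :
    loopDFA t i BState.blockstar cut = cut := by
  rw [(blockRun t i cut).1, hc]

-- MAIN: the DFA's cut reproduces A's loop result, up to a whitespace-only tail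
theorem loopDFA_main : ∀ (n : Nat) (s : List Char) (i : Nat), s.length ≤ n →
    ∃ w : List Char, w.all PySem.Chars.isspace = true ∧
      i ≤ loopDFA s i BState.code i ∧
      loopDFA s i BState.code i ≤ i + s.length ∧
      s.drop (loopDFA s i BState.code i - i) = loopA (PySem.Chars.lstrip s) ++ w := by
  intro n
  induction n with
  | zero =>
    intro s i hs
    have : s = [] := List.eq_nil_of_length_eq_zero (by omega)
    subst this
    refine ⟨[], rfl, ?_, ?_, ?_⟩ <;> simp [loopDFA, PySem.Chars.lstrip, loopA_of_ws]
  | succ n ih =>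
    intro s i hs
    cases s with
    | nil =>
      refine ⟨[], rfl, ?_, ?_, ?_⟩ <;> simp [loopDFA, PySem.Chars.lstrip, loopA_of_ws]
    | cons c rest =>
      by_cases hws : PySem.Chars.isspace c = true
      · rw [dfa_step_code, if_pos hws]
        obtain ⟨w, hw, hk1, hk2, hdrop⟩ := ih rest (i+1) (by simp at hs; omega)
        have hlst : PySem.Chars.lstrip (c :: rest) = PySem.Chars.lstrip rest := by
          rw [PySem.Chars.lstrip, PySem.Chars.lstrip, List.dropWhile_cons_of_pos hws]
        refine ⟨w, hw, by omega, by simp; omega, ?_⟩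
        rw [hlst, show loopDFA rest (i+1) BState.code (i+1) - i
            = (loopDFA rest (i+1) BState.code (i+1) - (i+1)) + 1 by omega,
          List.drop_succ_cons]
        exact hdrop
      · have hlst : PySem.Chars.lstrip (c :: rest) = c :: rest := by
          rw [PySem.Chars.lstrip, List.dropWhile_cons_of_neg (by simp [hws])]
        have hnx : (c :: rest) ≠ [] := by simp
        by_cases h2 : PySem.Chars.startswith (c :: rest) ['-', '-'] = true
        · obtain ⟨t, ht⟩ := (PySem.Chars.startswith_iff _ _).mp h2
          rw [List.cons_append, List.cons_append, List.nil_append] at ht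
          injection ht with hc ht'
          subst hc
          subst ht'
          have hstep : loopDFA ('-' :: '-' :: t) i BState.code i
              = loopDFA t (i+2) BState.line i := by
            rw [dfa_step_code, if_neg (by decide), if_pos rfl, dfa_step_dash, if_pos rfl]
          rw [hstep, lineRun]
          by_cases hm : '\n' ∈ t
          · rw [if_pos hm]
            set p := (t.takeWhile (fun y => y != '\n')).length with hp
            have hplt : p < t.length := takeWhile_nl_lt_length t hm
            obtain ⟨w, hw, hk1, hk2, hdrop⟩ := ih (t.drop (p+1)) (i+2+p+1)
              (by simp only [List.length_drop]; simp at hs; omega)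
            have hfA : PySem.Chars.find ('-' :: '-' :: t) ['\n'] = ((p + 2 : Nat) : Int) := by
              rw [find_singleton_mem _ _ (by simp [hm]),
                List.takeWhile_cons_of_pos (by decide), List.takeWhile_cons_of_pos (by decide)]
              simp [hp]
              omega
            have hA : loopA ('-' :: '-' :: t)
                = loopA (PySem.Chars.lstrip (t.drop (p + 1))) := by
              rw [loopA, dif_neg (by simp), dif_pos h2]
              simp only [hfA]
              rw [dif_neg (by omega)]
              rw [PySem.Chars.slice_eq_listSlice, PySem.List.slice_from _ (by omega)]
              rw [show (((p + 2 : Nat) : Int) + 1).toNat = (p + 1) + 1 + 1 by omega]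
              rw [List.drop_succ_cons, List.drop_succ_cons]
            simp only [List.length_drop] at hk2
            refine ⟨w, hw, by omega, by simp; omega, ?_⟩
            rw [hlst, hA]
            set K := loopDFA (t.drop (p+1)) (i+2+p+1) BState.code (i+2+p+1) with hK
            rw [show K - i = ((p + 1) + (K - (i+2+p+1))) + 1 + 1 by omega,
              List.drop_succ_cons, List.drop_succ_cons, ← List.drop_drop]
            exact hdrop
          · rw [if_neg hm]
            have hfA : PySem.Chars.find ('-' :: '-' :: t) ['\n'] = -1 :=
              find_singleton_not_mem _ _ (by simp [hm])
            have hA : loopA ('-' :: '-' :: t) = [] := by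
              rw [loopA, dif_neg (by simp), dif_pos h2]
              simp only [hfA]
              simp
            refine ⟨[], rfl, by omega, by simp; omega, ?_⟩
            rw [hlst, hA, List.append_nil, List.drop_eq_nil_of_le (by simp; omega)]
        · by_cases h3 : PySem.Chars.startswith (c :: rest) ['/', '*'] = true
          · obtain ⟨t, ht⟩ := (PySem.Chars.startswith_iff _ _).mp h3
            rw [List.cons_append, List.cons_append, List.nil_append] at ht
            injection ht with hc ht'
            subst hc
            subst ht'
            have hstep : loopDFA ('/' :: '*' :: t) i BState.code i
                = loopDFA t (i+2) BState.blockstar i := by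
              rw [dfa_step_code, if_neg (by decide), if_neg (by decide), if_pos rfl,
                dfa_step_slash, if_pos rfl]
            have hnp : ¬ ['*', '/'] <+: ('/' :: '*' :: t) := by
              intro hp
              rw [List.cons_prefix_cons] at hp
              exact absurd hp.1 (by decide)
            cases hc : close? t with
            | none =>
              rw [hstep, blockRun_none t (i+2) i hc]
              have hfA : PySem.Chars.find ('/' :: '*' :: t) ['*', '/'] = -1 := by
                rw [find_cons _ _ _ hnp, find_star_none t hc]
                simp
              have hA : loopA ('/' :: '*' :: t) = '/' :: '*' :: t := by
                rw [loopA, dif_neg (by simp), dif_neg h2, dif_pos h3]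
                simp only [hfA]
                simp
              exact ⟨[], rfl, le_refl _, by simp, by rw [hlst, hA]; simp⟩
            | some q =>
              rw [hstep, blockRun_some t (i+2) i q hc]
              have hq1 : q + 1 ≤ t.length := close?_le t q hc
              obtain ⟨w, hw, hk1, hk2, hdrop⟩ := ih (t.drop (q+1)) (i+2+q+1)
                (by simp only [List.length_drop]; simp at hs; omega)
              have hfA : PySem.Chars.find ('/' :: '*' :: t) ['*', '/'] = 1 + (q : Int) := by
                rw [find_cons _ _ _ hnp, find_star_some t q hc]
                rw [if_neg (by omega)]
              have hA : loopA ('/' :: '*' :: t)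
                  = loopA (PySem.Chars.lstrip (t.drop (q + 1))) := by
                rw [loopA, dif_neg (by simp), dif_neg h2, dif_pos h3]
                simp only [hfA]
                rw [dif_neg (by omega)]
                rw [PySem.Chars.slice_eq_listSlice, PySem.List.slice_from _ (by omega)]
                rw [show ((1 + (q : Int)) + 2).toNat = (q + 1) + 1 + 1 by omega]
                rw [List.drop_succ_cons, List.drop_succ_cons]
              simp only [List.length_drop] at hk2
              refine ⟨w, hw, by omega, by simp; omega, ?_⟩
              rw [hlst, hA]
              set K := loopDFA (t.drop (q+1)) (i+2+q+1) BState.code (i+2+q+1) with hK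
              rw [show K - i = ((q + 1) + (K - (i+2+q+1))) + 1 + 1 by omega,
                List.drop_succ_cons, List.drop_succ_cons, ← List.drop_drop]
              exact hdrop
          · have hK : loopDFA (c :: rest) i BState.code i = i := by
              rw [dfa_step_code, if_neg (by simp [hws])]
              by_cases hc1 : c = '-'
              · rw [if_pos hc1]
                cases rest with
                | nil => simp [loopDFA]
                | cons d r2 =>
                  have hd : ¬ d = '-' := by
                    intro hdd
                    subst hdd
                    subst hc1
                    exact h2 ((PySem.Chars.startswith_iff _ _).mpr ⟨r2, rfl⟩)
                  rw [dfa_step_dash, if_neg hd]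
              · rw [if_neg hc1]
                by_cases hc2 : c = '/'
                · rw [if_pos hc2]
                  cases rest with
                  | nil => simp [loopDFA]
                  | cons d r2 =>
                    have hd : ¬ d = '*' := by
                      intro hdd
                      subst hdd
                      subst hc2
                      exact h3 ((PySem.Chars.startswith_iff _ _).mpr ⟨r2, rfl⟩)
                    rw [dfa_step_slash, if_neg hd]
                · rw [if_neg hc2]
            have hA : loopA (c :: rest) = c :: rest := by
              rw [loopA, dif_neg hnx, dif_neg h2, dif_neg h3]
            exact ⟨[], rfl, by omega, by rw [hK]; simp,
              by rw [hK, Nat.sub_self, List.drop_zero, hlst, hA, List.append_nil]⟩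

-- every list is its rstrip plus a whitespace tail
theorem rstrip_decomp (y : List Char) :
    ∃ w : List Char, w.all PySem.Chars.isspace = true ∧ y = PySem.Chars.rstrip y ++ w := by
  refine ⟨(y.reverse.takeWhile PySem.Chars.isspace).reverse, ?_, ?_⟩
  · rw [List.all_eq_true]
    intro c hc
    rw [List.mem_reverse] at hc
    exact List.mem_takeWhile_imp hc
  · rw [PySem.Chars.rstrip]
    conv_lhs => rw [← y.reverse_reverse, ← List.takeWhile_append_dropWhile (p := PySem.Chars.isspace) (l := y.reverse)]
    rw [List.reverse_append]

-- ===== VERDICT (by name: the statement is the Claim_ definition above) =====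
theorem after_leading_comments_py_spec : Claim_equal_after_leading_comments_py := by
  intro sql _
  unfold Spec_after_leading_comments_py after_leading_comments_py after_leading_comments_py_alt
  set l := sql.toList
  obtain ⟨w, hw, _, _, hdrop⟩ := loopDFA_main (l.length) l 0 (le_refl _)
  rw [Nat.sub_zero] at hdrop
  rw [hdrop, post_append_ws _ _ hw]
  obtain ⟨w2, hw2, hdec⟩ := rstrip_decomp (PySem.Chars.lstrip l)
  have hstrip : PySem.Chars.lstrip l = PySem.Chars.strip l ++ w2 := by
    rw [PySem.Chars.strip]; exact hdec
  rw [hstrip]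
  obtain ⟨w3, hw3, hA⟩ := loopA_append_ws ((PySem.Chars.strip l).length) (PySem.Chars.strip l) w2 (le_refl _) hw2
  rw [hA, post_append_ws _ _ hw3]
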